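-- pv_equiv track=rewrite | github.com/suyog19/ai-dev-orchestrator | app/workflows.py | _classify_node_files
-- ===== SOURCE A (Python) =====
-- _NODE_BUILD_PATTERNS   = ("package.json", "yarn.lock", "pnpm-lock", "package-lock", ".lock")
--
-- _NODE_STATE_PATTERNS   = ("store", "slice", "context", "redux", "zustand", "recoil", "atom")
--
-- _NODE_HOOK_PATTERNS    = ("/hooks/", "/hook/")
--
-- _NODE_ROUTE_PATTERNS   = ("/routes/", "/route/", "/pages/", "/page/", "router")
--
-- _NODE_API_PATTERNS     = ("/api/", "/services/", "/service/", "client", "fetch", "axios")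
--
-- _NODE_CONFIG_PATTERNS  = (".env", "vite.config", "tsconfig", "next.config", "jest.config", "vitest.config", ".eslintrc")
--
-- _JAVA_TEST_PATTERNS   = ("src/test/", "Test.java", "Tests.java", "IT.java", "Spec.java")
--
-- _NODE_TEST_PATTERNS   = (".test.ts", ".test.tsx", ".test.js", ".spec.ts", ".spec.tsx", ".spec.js", "__tests__/")
--
-- _PYTHON_TEST_PATTERNS = ("tests/", "test_", "_test.py", "/test")
--
-- def _is_test_file(path: str, profile_name: str | None = None) -> bool:
--     """Return True if a file path looks like a test file, using profile-aware patterns."""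
--     if profile_name in ("java_maven", "java_gradle"):
--         return any(p in path for p in _JAVA_TEST_PATTERNS)
--     if profile_name == "node_react":
--         return any(p in path for p in _NODE_TEST_PATTERNS)
--     return any(p in path for p in _PYTHON_TEST_PATTERNS)
--
-- def _classify_node_files(files: list[str]) -> dict:
--     """Classify changed files using Node/React layer patterns."""
--     groups: dict[str, list[str]] = {
--         "component": [], "hook": [], "route": [], "state": [], "api": [], "config": [], "test": [], "build": [], "other": [],
--     }
--     for f in files:
--         fl = f.lower()
--         if _is_test_file(f, "node_react"):
--             groups["test"].append(f)
--         elif any(p in fl for p in _NODE_BUILD_PATTERNS):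
--             groups["build"].append(f)
--         elif any(p in fl for p in _NODE_STATE_PATTERNS):
--             groups["state"].append(f)
--         elif any(p in fl for p in _NODE_HOOK_PATTERNS):
--             groups["hook"].append(f)
--         elif any(p in fl for p in _NODE_ROUTE_PATTERNS):
--             groups["route"].append(f)
--         elif any(p in fl for p in _NODE_API_PATTERNS):
--             groups["api"].append(f)
--         elif any(p in fl for p in _NODE_CONFIG_PATTERNS):
--             groups["config"].append(f)
--         elif f.endswith((".tsx", ".jsx")):
--             groups["component"].append(f)
--         else:
--             groups["other"].append(f)
--     return {k: v for k, v in groups.items() if v}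
-- ===== SOURCE B (Python) =====
-- _NODE_BUILD_PATTERNS   = ("package.json", "yarn.lock", "pnpm-lock", "package-lock", ".lock")
-- _NODE_STATE_PATTERNS   = ("store", "slice", "context", "redux", "zustand", "recoil", "atom")
-- _NODE_HOOK_PATTERNS    = ("/hooks/", "/hook/")
-- _NODE_ROUTE_PATTERNS   = ("/routes/", "/route/", "/pages/", "/page/", "router")
-- _NODE_API_PATTERNS     = ("/api/", "/services/", "/service/", "client", "fetch", "axios")
-- _NODE_CONFIG_PATTERNS  = (".env", "vite.config", "tsconfig", "next.config", "jest.config", "vitest.config", ".eslintrc")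
-- _NODE_TEST_PATTERNS    = (".test.ts", ".test.tsx", ".test.js", ".spec.ts", ".spec.tsx", ".spec.js", "__tests__/")
--
-- # Ordered rule table: first matching rule names the group. Test matches on the raw
-- # path, the pattern groups on the lowercased path, component on the raw suffix.
-- _RULES = (
--     ("test",      lambda f, fl: any(p in f for p in _NODE_TEST_PATTERNS)),
--     ("build",     lambda f, fl: any(p in fl for p in _NODE_BUILD_PATTERNS)),
--     ("state",     lambda f, fl: any(p in fl for p in _NODE_STATE_PATTERNS)),
--     ("hook",      lambda f, fl: any(p in fl for p in _NODE_HOOK_PATTERNS)),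
--     ("route",     lambda f, fl: any(p in fl for p in _NODE_ROUTE_PATTERNS)),
--     ("api",       lambda f, fl: any(p in fl for p in _NODE_API_PATTERNS)),
--     ("config",    lambda f, fl: any(p in fl for p in _NODE_CONFIG_PATTERNS)),
--     ("component", lambda f, fl: f.endswith((".tsx", ".jsx"))),
-- )
--
-- _GROUP_ORDER = ("component", "hook", "route", "state", "api", "config", "test", "build", "other")
--
-- def _label(f: str) -> str:
--     fl = f.lower()
--     for name, pred in _RULES:
--         if pred(f, fl):
--             return name
--     return "other"
--
-- def _classify_node_files(files: list[str]) -> dict: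
--     """Classify changed files using Node/React layer patterns."""
--     labels = [_label(f) for f in files]
--     out: dict[str, list[str]] = {}
--     for g in _GROUP_ORDER:
--         grp = [f for f, l in zip(files, labels) if l == g]
--         if grp:
--             out[g] = grp
--     return out
-- ===== Notes on version B (the rewrite author's own statement) =====
-- stated objective: simpler
-- what changed: Replaces the nine-way elif ladder appending into a pre-seeded dict of lists by a single _label function driven by an ordered rule table, then builds the result by collecting, per group in output order, the files whose label is that group, keeping non-empty groups.
import Mathlib
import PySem

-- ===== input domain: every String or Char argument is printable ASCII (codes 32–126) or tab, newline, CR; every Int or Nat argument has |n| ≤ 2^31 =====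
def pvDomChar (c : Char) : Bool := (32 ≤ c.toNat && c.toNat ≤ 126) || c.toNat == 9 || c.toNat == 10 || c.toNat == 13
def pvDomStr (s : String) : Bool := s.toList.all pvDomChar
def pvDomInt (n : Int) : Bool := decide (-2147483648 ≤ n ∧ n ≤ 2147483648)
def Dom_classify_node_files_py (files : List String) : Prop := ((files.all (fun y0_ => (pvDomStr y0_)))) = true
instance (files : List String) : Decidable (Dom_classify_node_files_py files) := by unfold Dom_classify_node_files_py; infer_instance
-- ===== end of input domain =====

-- B replaces A's elif ladder over a pre-seeded dict of lists by a label function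
-- driven by an ordered rule table plus a per-group collection pass (objective: simpler).


-- ===== PORT A =====
def pvNodeBuildPatterns : List String := ["package.json", "yarn.lock", "pnpm-lock", "package-lock", ".lock"]
def pvNodeStatePatterns : List String := ["store", "slice", "context", "redux", "zustand", "recoil", "atom"]
def pvNodeHookPatterns : List String := ["/hooks/", "/hook/"]
def pvNodeRoutePatterns : List String := ["/routes/", "/route/", "/pages/", "/page/", "router"]
def pvNodeApiPatterns : List String := ["/api/", "/services/", "/service/", "client", "fetch", "axios"]
def pvNodeConfigPatterns : List String := [".env", "vite.config", "tsconfig", "next.config", "jest.config", "vitest.config", ".eslintrc"]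
def pvJavaTestPatterns : List String := ["src/test/", "Test.java", "Tests.java", "IT.java", "Spec.java"]
def pvNodeTestPatterns : List String := [".test.ts", ".test.tsx", ".test.js", ".spec.ts", ".spec.tsx", ".spec.js", "__tests__/"]
def pvPythonTestPatterns : List String := ["tests/", "test_", "_test.py", "/test"]

-- port of _is_test_file
def pvIsTestFile (path : String) (profileName : Option String) : Bool :=
  if profileName == some "java_maven" || profileName == some "java_gradle" then
    pvJavaTestPatterns.any (fun p => PySem.Str.isIn p path)
  else if profileName == some "node_react" then
    pvNodeTestPatterns.any (fun p => PySem.Str.isIn p path)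
  else
    pvPythonTestPatterns.any (fun p => PySem.Str.isIn p path)

-- the loop body of A: the elif ladder appending f into the matching group
def pvStepA (groups : PySem.Dict String (List String)) (f : String) : PySem.Dict String (List String) :=
  let fl := PySem.Str.lower f
  if pvIsTestFile f (some "node_react") then groups.modify "test" [] (· ++ [f])
  else if pvNodeBuildPatterns.any (fun p => PySem.Str.isIn p fl) then groups.modify "build" [] (· ++ [f])
  else if pvNodeStatePatterns.any (fun p => PySem.Str.isIn p fl) then groups.modify "state" [] (· ++ [f])
  else if pvNodeHookPatterns.any (fun p => PySem.Str.isIn p fl) then groups.modify "hook" [] (· ++ [f])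
  else if pvNodeRoutePatterns.any (fun p => PySem.Str.isIn p fl) then groups.modify "route" [] (· ++ [f])
  else if pvNodeApiPatterns.any (fun p => PySem.Str.isIn p fl) then groups.modify "api" [] (· ++ [f])
  else if pvNodeConfigPatterns.any (fun p => PySem.Str.isIn p fl) then groups.modify "config" [] (· ++ [f])
  else if PySem.Str.endswith f ".tsx" || PySem.Str.endswith f ".jsx" then groups.modify "component" [] (· ++ [f])
  else groups.modify "other" [] (· ++ [f])

def classify_node_files_py (files : List String) : List (String × List String) :=
  let init : PySem.Dict String (List String) := PySem.Dict.mk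
    [("component", []), ("hook", []), ("route", []), ("state", []), ("api", []),
     ("config", []), ("test", []), ("build", []), ("other", [])]
  let groups := files.foldl pvStepA init
  groups.items.filter (fun kv => !kv.2.isEmpty)

-- ===== PORT B =====
-- Source B's ordered rule table: first matching rule names the group
def pvRules : List (String × (String → String → Bool)) :=
  [ ("test",      fun f _  => pvNodeTestPatterns.any (fun p => PySem.Str.isIn p f)),
    ("build",     fun _ fl => pvNodeBuildPatterns.any (fun p => PySem.Str.isIn p fl)),
    ("state",     fun _ fl => pvNodeStatePatterns.any (fun p => PySem.Str.isIn p fl)),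
    ("hook",      fun _ fl => pvNodeHookPatterns.any (fun p => PySem.Str.isIn p fl)),
    ("route",     fun _ fl => pvNodeRoutePatterns.any (fun p => PySem.Str.isIn p fl)),
    ("api",       fun _ fl => pvNodeApiPatterns.any (fun p => PySem.Str.isIn p fl)),
    ("config",    fun _ fl => pvNodeConfigPatterns.any (fun p => PySem.Str.isIn p fl)),
    ("component", fun f _  => PySem.Str.endswith f ".tsx" || PySem.Str.endswith f ".jsx") ]

def pvGroupOrder : List String :=
  ["component", "hook", "route", "state", "api", "config", "test", "build", "other"]

-- port of _label
def pvLabel (f : String) : String :=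
  let fl := PySem.Str.lower f
  match pvRules.find? (fun r => r.2 f fl) with
  | some r => r.1
  | none => "other"

def classify_node_files_py_alt (files : List String) : List (String × List String) :=
  let labels := files.map pvLabel
  pvGroupOrder.foldl (fun out g =>
    let grp := ((files.zip labels).filter (fun p => p.2 == g)).map (fun p => p.1)
    if grp.isEmpty then out else out ++ [(g, grp)]) []

-- ===== PRECONDITION & SPEC =====
def Spec_classify_node_files_py (files : List String) (out : List (String × List String)) : Prop := out = classify_node_files_py_alt files
instance (files : List String) (out : List (String × List String)) : Decidable (Spec_classify_node_files_py files out) := by unfold Spec_classify_node_files_py; infer_instance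

-- ===== CLAIM (what is proved, stated in full; the proofs are below) =====
def Claim_equal_classify_node_files_py : Prop := ∀ (files : List String), Dom_classify_node_files_py files → Spec_classify_node_files_py files (classify_node_files_py files)

-- ===== LEMMAS AND PROOFS =====

set_option maxHeartbeats 2000000

-- the nine-slot group dict as a literal association list
def pvMk (c h r s api cfg t b o : List String) : List (String × List String) :=
  [("component", c), ("hook", h), ("route", r), ("state", s), ("api", api),
   ("config", cfg), ("test", t), ("build", b), ("other", o)]

def pvE (f g : String) : List String := if pvLabel f == g then [f] else []

lemma pvIsTestFile_node (f : String) :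
    pvIsTestFile f (some "node_react") = (pvNodeTestPatterns.any fun p => PySem.Str.isIn p f) := rfl

lemma pvLabel_1 (f : String)
    (h1 : (pvNodeTestPatterns.any fun p => PySem.Str.isIn p f) = true) :
    pvLabel f = "test" := by
  unfold pvLabel pvRules; simp only [List.find?, h1]

lemma pvLabel_2 (f : String)
    (h1 : (pvNodeTestPatterns.any fun p => PySem.Str.isIn p f) = false)
    (h2 : (pvNodeBuildPatterns.any fun p => PySem.Str.isIn p (PySem.Str.lower f)) = true) :
    pvLabel f = "build" := by
  unfold pvLabel pvRules; simp only [List.find?, h1, h2]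

lemma pvLabel_3 (f : String)
    (h1 : (pvNodeTestPatterns.any fun p => PySem.Str.isIn p f) = false)
    (h2 : (pvNodeBuildPatterns.any fun p => PySem.Str.isIn p (PySem.Str.lower f)) = false)
    (h3 : (pvNodeStatePatterns.any fun p => PySem.Str.isIn p (PySem.Str.lower f)) = true) :
    pvLabel f = "state" := by
  unfold pvLabel pvRules; simp only [List.find?, h1, h2, h3]

lemma pvLabel_4 (f : String)
    (h1 : (pvNodeTestPatterns.any fun p => PySem.Str.isIn p f) = false)
    (h2 : (pvNodeBuildPatterns.any fun p => PySem.Str.isIn p (PySem.Str.lower f)) = false)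
    (h3 : (pvNodeStatePatterns.any fun p => PySem.Str.isIn p (PySem.Str.lower f)) = false)
    (h4 : (pvNodeHookPatterns.any fun p => PySem.Str.isIn p (PySem.Str.lower f)) = true) :
    pvLabel f = "hook" := by
  unfold pvLabel pvRules; simp only [List.find?, h1, h2, h3, h4]

lemma pvLabel_5 (f : String)
    (h1 : (pvNodeTestPatterns.any fun p => PySem.Str.isIn p f) = false)
    (h2 : (pvNodeBuildPatterns.any fun p => PySem.Str.isIn p (PySem.Str.lower f)) = false)
    (h3 : (pvNodeStatePatterns.any fun p => PySem.Str.isIn p (PySem.Str.lower f)) = false)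
    (h4 : (pvNodeHookPatterns.any fun p => PySem.Str.isIn p (PySem.Str.lower f)) = false)
    (h5 : (pvNodeRoutePatterns.any fun p => PySem.Str.isIn p (PySem.Str.lower f)) = true) :
    pvLabel f = "route" := by
  unfold pvLabel pvRules; simp only [List.find?, h1, h2, h3, h4, h5]

lemma pvLabel_6 (f : String)
    (h1 : (pvNodeTestPatterns.any fun p => PySem.Str.isIn p f) = false)
    (h2 : (pvNodeBuildPatterns.any fun p => PySem.Str.isIn p (PySem.Str.lower f)) = false)
    (h3 : (pvNodeStatePatterns.any fun p => PySem.Str.isIn p (PySem.Str.lower f)) = false)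
    (h4 : (pvNodeHookPatterns.any fun p => PySem.Str.isIn p (PySem.Str.lower f)) = false)
    (h5 : (pvNodeRoutePatterns.any fun p => PySem.Str.isIn p (PySem.Str.lower f)) = false)
    (h6 : (pvNodeApiPatterns.any fun p => PySem.Str.isIn p (PySem.Str.lower f)) = true) :
    pvLabel f = "api" := by
  unfold pvLabel pvRules; simp only [List.find?, h1, h2, h3, h4, h5, h6]

lemma pvLabel_7 (f : String)
    (h1 : (pvNodeTestPatterns.any fun p => PySem.Str.isIn p f) = false)
    (h2 : (pvNodeBuildPatterns.any fun p => PySem.Str.isIn p (PySem.Str.lower f)) = false)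
    (h3 : (pvNodeStatePatterns.any fun p => PySem.Str.isIn p (PySem.Str.lower f)) = false)
    (h4 : (pvNodeHookPatterns.any fun p => PySem.Str.isIn p (PySem.Str.lower f)) = false)
    (h5 : (pvNodeRoutePatterns.any fun p => PySem.Str.isIn p (PySem.Str.lower f)) = false)
    (h6 : (pvNodeApiPatterns.any fun p => PySem.Str.isIn p (PySem.Str.lower f)) = false)
    (h7 : (pvNodeConfigPatterns.any fun p => PySem.Str.isIn p (PySem.Str.lower f)) = true) :
    pvLabel f = "config" := by
  unfold pvLabel pvRules; simp only [List.find?, h1, h2, h3, h4, h5, h6, h7]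

lemma pvLabel_8 (f : String)
    (h1 : (pvNodeTestPatterns.any fun p => PySem.Str.isIn p f) = false)
    (h2 : (pvNodeBuildPatterns.any fun p => PySem.Str.isIn p (PySem.Str.lower f)) = false)
    (h3 : (pvNodeStatePatterns.any fun p => PySem.Str.isIn p (PySem.Str.lower f)) = false)
    (h4 : (pvNodeHookPatterns.any fun p => PySem.Str.isIn p (PySem.Str.lower f)) = false)
    (h5 : (pvNodeRoutePatterns.any fun p => PySem.Str.isIn p (PySem.Str.lower f)) = false)
    (h6 : (pvNodeApiPatterns.any fun p => PySem.Str.isIn p (PySem.Str.lower f)) = false)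
    (h7 : (pvNodeConfigPatterns.any fun p => PySem.Str.isIn p (PySem.Str.lower f)) = false)
    (h8 : (PySem.Str.endswith f ".tsx" || PySem.Str.endswith f ".jsx") = true) :
    pvLabel f = "component" := by
  unfold pvLabel pvRules; simp only [List.find?, h1, h2, h3, h4, h5, h6, h7, h8]

lemma pvLabel_9 (f : String)
    (h1 : (pvNodeTestPatterns.any fun p => PySem.Str.isIn p f) = false)
    (h2 : (pvNodeBuildPatterns.any fun p => PySem.Str.isIn p (PySem.Str.lower f)) = false)
    (h3 : (pvNodeStatePatterns.any fun p => PySem.Str.isIn p (PySem.Str.lower f)) = false)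
    (h4 : (pvNodeHookPatterns.any fun p => PySem.Str.isIn p (PySem.Str.lower f)) = false)
    (h5 : (pvNodeRoutePatterns.any fun p => PySem.Str.isIn p (PySem.Str.lower f)) = false)
    (h6 : (pvNodeApiPatterns.any fun p => PySem.Str.isIn p (PySem.Str.lower f)) = false)
    (h7 : (pvNodeConfigPatterns.any fun p => PySem.Str.isIn p (PySem.Str.lower f)) = false)
    (h8 : (PySem.Str.endswith f ".tsx" || PySem.Str.endswith f ".jsx") = false) :
    pvLabel f = "other" := by
  unfold pvLabel pvRules; simp only [List.find?, h1, h2, h3, h4, h5, h6, h7, h8]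

lemma pvStepA_items (c h r s api cfg t b o : List String) (f : String) :
    pvStepA (PySem.Dict.mk (pvMk c h r s api cfg t b o)) f =
    PySem.Dict.mk (pvMk (c ++ pvE f "component") (h ++ pvE f "hook") (r ++ pvE f "route")
      (s ++ pvE f "state") (api ++ pvE f "api") (cfg ++ pvE f "config")
      (t ++ pvE f "test") (b ++ pvE f "build") (o ++ pvE f "other")) := by
  unfold pvStepA
  rw [pvIsTestFile_node]
  cases h1 : (pvNodeTestPatterns.any fun p => PySem.Str.isIn p f) with
  | false =>
    cases h2 : (pvNodeBuildPatterns.any fun p => PySem.Str.isIn p (PySem.Str.lower f)) with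
    | false =>
      cases h3 : (pvNodeStatePatterns.any fun p => PySem.Str.isIn p (PySem.Str.lower f)) with
      | false =>
        cases h4 : (pvNodeHookPatterns.any fun p => PySem.Str.isIn p (PySem.Str.lower f)) with
        | false =>
          cases h5 : (pvNodeRoutePatterns.any fun p => PySem.Str.isIn p (PySem.Str.lower f)) with
          | false =>
            cases h6 : (pvNodeApiPatterns.any fun p => PySem.Str.isIn p (PySem.Str.lower f)) with
            | false =>
              cases h7 : (pvNodeConfigPatterns.any fun p => PySem.Str.isIn p (PySem.Str.lower f)) with
              | false =>
                cases h8 : (PySem.Str.endswith f ".tsx" || PySem.Str.endswith f ".jsx") with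
                | false =>
                  have hl := pvLabel_9 f h1 h2 h3 h4 h5 h6 h7 h8
                  simp only [h1, h2, h3, h4, h5, h6, h7, h8, reduceIte]
                  simp [hl, pvE, pvMk, PySem.Dict.modify, PySem.Dict.insert,
                    PySem.Dict.getD, PySem.Dict.get?, PySem.Dict.contains]
                | true =>
                  have hl := pvLabel_8 f h1 h2 h3 h4 h5 h6 h7 h8
                  simp only [h1, h2, h3, h4, h5, h6, h7, h8, reduceIte]
                  simp [hl, pvE, pvMk, PySem.Dict.modify, PySem.Dict.insert,
                    PySem.Dict.getD, PySem.Dict.get?, PySem.Dict.contains]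
              | true =>
                have hl := pvLabel_7 f h1 h2 h3 h4 h5 h6 h7
                simp only [h1, h2, h3, h4, h5, h6, h7, reduceIte]
                simp [hl, pvE, pvMk, PySem.Dict.modify, PySem.Dict.insert,
                  PySem.Dict.getD, PySem.Dict.get?, PySem.Dict.contains]
            | true =>
              have hl := pvLabel_6 f h1 h2 h3 h4 h5 h6
              simp only [h1, h2, h3, h4, h5, h6, reduceIte]
              simp [hl, pvE, pvMk, PySem.Dict.modify, PySem.Dict.insert,
                PySem.Dict.getD, PySem.Dict.get?, PySem.Dict.contains]
          | true =>
            have hl := pvLabel_5 f h1 h2 h3 h4 h5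
            simp only [h1, h2, h3, h4, h5, reduceIte]
            simp [hl, pvE, pvMk, PySem.Dict.modify, PySem.Dict.insert,
              PySem.Dict.getD, PySem.Dict.get?, PySem.Dict.contains]
        | true =>
          have hl := pvLabel_4 f h1 h2 h3 h4
          simp only [h1, h2, h3, h4, reduceIte]
          simp [hl, pvE, pvMk, PySem.Dict.modify, PySem.Dict.insert,
            PySem.Dict.getD, PySem.Dict.get?, PySem.Dict.contains]
      | true =>
        have hl := pvLabel_3 f h1 h2 h3
        simp only [h1, h2, h3, reduceIte]
        simp [hl, pvE, pvMk, PySem.Dict.modify, PySem.Dict.insert,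
          PySem.Dict.getD, PySem.Dict.get?, PySem.Dict.contains]
    | true =>
      have hl := pvLabel_2 f h1 h2
      simp only [h1, h2, reduceIte]
      simp [hl, pvE, pvMk, PySem.Dict.modify, PySem.Dict.insert,
        PySem.Dict.getD, PySem.Dict.get?, PySem.Dict.contains]
  | true =>
    have hl := pvLabel_1 f h1
    simp only [h1, reduceIte]
    simp [hl, pvE, pvMk, PySem.Dict.modify, PySem.Dict.insert,
      PySem.Dict.getD, PySem.Dict.get?, PySem.Dict.contains]

lemma pvE_append (f g : String) (x l : List String) :
    (x ++ pvE f g) ++ l = x ++ (if (pvLabel f == g) = true then f :: l else l) := by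
  unfold pvE; split_ifs <;> simp

lemma pvFoldA_items (files : List String) (c h r s api cfg t b o : List String) :
    (files.foldl pvStepA (PySem.Dict.mk (pvMk c h r s api cfg t b o))).items =
    pvMk (c ++ files.filter (fun f => pvLabel f == "component"))
      (h ++ files.filter (fun f => pvLabel f == "hook"))
      (r ++ files.filter (fun f => pvLabel f == "route"))
      (s ++ files.filter (fun f => pvLabel f == "state"))
      (api ++ files.filter (fun f => pvLabel f == "api"))
      (cfg ++ files.filter (fun f => pvLabel f == "config"))
      (t ++ files.filter (fun f => pvLabel f == "test"))
      (b ++ files.filter (fun f => pvLabel f == "build"))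
      (o ++ files.filter (fun f => pvLabel f == "other")) := by
  induction files generalizing c h r s api cfg t b o with
  | nil => simp [pvMk]
  | cons f fs ih =>
      simp only [List.foldl_cons, pvStepA_items, ih, List.filter_cons]
      rw [pvE_append, pvE_append, pvE_append, pvE_append, pvE_append, pvE_append,
        pvE_append, pvE_append, pvE_append]

lemma pvZipLabel (files : List String) (g : String) :
    (((files.zip (files.map pvLabel)).filter (fun p => p.2 == g)).map (fun p => p.1)) =
    files.filter (fun f => pvLabel f == g) := by
  induction files with
  | nil => simp
  | cons f fs ih =>
      simp only [List.map_cons, List.zip_cons_cons, List.filter_cons]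
      by_cases hf : (pvLabel f == g) = true
      · simp [hf, ih]
      · simp [hf, ih]

lemma pvCollect (files : List String) (gs : List String) (acc : List (String × List String)) :
    gs.foldl (fun out g =>
      if (files.filter (fun f => pvLabel f == g)).isEmpty then out
      else out ++ [(g, files.filter (fun f => pvLabel f == g))]) acc =
    acc ++ (gs.map (fun g => (g, files.filter (fun f => pvLabel f == g)))).filter
      (fun kv => !kv.2.isEmpty) := by
  induction gs generalizing acc with
  | nil => simp
  | cons g gs ih =>
      rw [List.foldl_cons, List.map_cons, List.filter_cons]
      by_cases hg : (files.filter (fun f => pvLabel f == g)).isEmpty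
      · rw [if_pos hg, ih]
        have : (!(g, files.filter (fun f => pvLabel f == g)).2.isEmpty) = false := by
          simpa using hg
        rw [this]; simp
      · rw [if_neg hg, ih]
        have : (!(g, files.filter (fun f => pvLabel f == g)).2.isEmpty) = true := by
          simpa using hg
        rw [this]; simp

-- ===== VERDICT (by name: the statement is the Claim_ definition above) =====
theorem classify_node_files_py_spec : Claim_equal_classify_node_files_py := by
  intro files _
  unfold Spec_classify_node_files_py classify_node_files_py classify_node_files_py_alt
  dsimp only
  simp only [pvZipLabel]
  have h0 : (PySem.Dict.mk
      [("component", ([] : List String)), ("hook", []), ("route", []), ("state", []), ("api", []),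
       ("config", []), ("test", []), ("build", []), ("other", [])]) =
      PySem.Dict.mk (pvMk [] [] [] [] [] [] [] [] []) := rfl
  rw [h0, pvFoldA_items, pvCollect]
  simp [pvMk, pvGroupOrder]
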